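-- pv_equiv track=rewrite | github.com/sandro20450/bichos-app | app_pentagono.py | gerar_esquadrao_9_antiga_15
-- ===== SOURCE A (Python) =====
-- def gerar_esquadrao_9_antiga_15(hist_milhares):
--     if not hist_milhares: return [str(x) for x in range(9)]
--     esquadrao = []
--     janela = hist_milhares[-15:] if len(hist_milhares) >= 15 else hist_milhares
--     for m in janela:
--         for d in m:
--             if d not in esquadrao:
--                 esquadrao.append(d)
--                 if len(esquadrao) == 9: break
--         if len(esquadrao) == 9: break
--     while len(esquadrao) < 9:
--         for d in [str(x) for x in range(10)]:
--             if d not in esquadrao: esquadrao.append(d); break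
--     esquadrao.sort()
--     return esquadrao
-- ===== SOURCE B (Python) =====
-- def gerar_esquadrao_9_antiga_15(hist_milhares):
--     if not hist_milhares:
--         return [str(x) for x in range(9)]
--     flat = [d for m in hist_milhares[-15:] for d in m]
--     first = {}
--     for i, d in reversed(list(enumerate(flat))):
--         first[d] = i
--     sel = sorted(first, key=first.get)[:9]
--     pad = [d for d in map(str, range(10)) if d not in sel][:9 - len(sel)]
--     return sorted(sel + pad)
-- ===== Notes on version B (the rewrite author's own statement) =====
-- stated objective: alternative
-- what changed: Instead of A's nested early-breaking membership scans plus a while-loop that rescans the ten digits, B builds a first-occurrence-index map in one reverse pass over the flattened window, sorts the distinct values by that index and takes 9, then pads with a filtered slice of the digits and sorts once.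
import Mathlib
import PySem

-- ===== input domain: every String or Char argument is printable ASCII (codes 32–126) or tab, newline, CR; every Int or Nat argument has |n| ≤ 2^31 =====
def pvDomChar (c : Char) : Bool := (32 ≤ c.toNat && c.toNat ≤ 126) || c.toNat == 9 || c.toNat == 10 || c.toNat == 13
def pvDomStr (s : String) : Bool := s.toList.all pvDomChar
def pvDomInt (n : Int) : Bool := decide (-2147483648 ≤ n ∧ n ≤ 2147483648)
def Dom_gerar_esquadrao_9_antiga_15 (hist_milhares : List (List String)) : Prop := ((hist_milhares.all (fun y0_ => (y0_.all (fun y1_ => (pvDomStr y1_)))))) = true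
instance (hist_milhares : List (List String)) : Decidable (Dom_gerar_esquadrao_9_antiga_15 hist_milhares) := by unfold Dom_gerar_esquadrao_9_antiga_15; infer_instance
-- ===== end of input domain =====

-- B selects the 9 values by sorting the window's distinct values by a first-occurrence-index
-- map built in one reverse pass, then pads by a filtered slice (objective: alternative).

-- ===== PORT A =====
-- inner 'for d in m' loop with its two breaks
def pvInnerA : List String → List String → List String
  | acc, [] => acc
  | acc, d :: ds =>
    if d ∈ acc then pvInnerA acc ds
    else
      let acc' := acc ++ [d]
      if acc'.length = 9 then acc' else pvInnerA acc' ds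

-- outer 'for m in janela' loop with its break
def pvOuterA : List String → List (List String) → List String
  | acc, [] => acc
  | acc, m :: ms =>
    let acc' := pvInnerA acc m
    if acc'.length = 9 then acc' else pvOuterA acc' ms

def pvDigits : List String := (PySem.List.pyRange 0 10 1).map PySem.Int.toStr

-- 'while len(esquadrao) < 9: for d in digits: if d not in: append; break'
-- (each pass appends the first missing digit; some digit is always missing, so the
--  'none' fallback is unreachable — it only makes the recursion total)
def pvTopupA (acc : List String) : List String :=
  if acc.length < 9 then
    match pvDigits.find? (fun d => decide (d ∉ acc)) with
    | some d => pvTopupA (acc ++ [d])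
    | none => acc
  else acc
termination_by 9 - acc.length
decreasing_by simp_all; omega

def gerar_esquadrao_9_antiga_15 (hist_milhares : List (List String)) : List String :=
  if hist_milhares = [] then (PySem.List.pyRange 0 9 1).map PySem.Int.toStr
  else
    let janela := if 15 ≤ hist_milhares.length then PySem.List.slice hist_milhares (some (-15)) none else hist_milhares
    let esquadrao := pvOuterA [] janela
    let esquadrao := pvTopupA esquadrao
    PySem.List.sorted esquadrao (fun x => x) false

-- ===== PORT B =====
-- 'first = {}; for i, d in reversed(list(enumerate(flat))): first[d] = i'
def pvFirstB (flat : List String) : PySem.Dict String Int :=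
  ((PySem.List.enumerate flat 0).reverse).foldl (fun d p => d.insert p.2 p.1) PySem.Dict.empty

def gerar_esquadrao_9_antiga_15_alt (hist_milhares : List (List String)) : List String :=
  if hist_milhares = [] then (PySem.List.pyRange 0 9 1).map PySem.Int.toStr
  else
    let flat := (PySem.List.slice hist_milhares (some (-15)) none).flatMap (fun m => m)
    let first := pvFirstB flat
    -- 'sorted(first, key=first.get)': every iterated key is in the dict, so first.get k = first.getD k 0 here
    let sel := (PySem.List.sorted first.keys (fun k => first.getD k 0) false).take 9
    let pad := (((PySem.List.pyRange 0 10 1).map PySem.Int.toStr).filter (fun d => decide (d ∉ sel))).take (9 - sel.length)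
    PySem.List.sorted (sel ++ pad) (fun x => x) false

-- ===== PRECONDITION & SPEC =====
def Spec_gerar_esquadrao_9_antiga_15 (hist_milhares : List (List String)) (out : List String) : Prop := out = gerar_esquadrao_9_antiga_15_alt hist_milhares
instance (hist_milhares : List (List String)) (out : List String) : Decidable (Spec_gerar_esquadrao_9_antiga_15 hist_milhares out) := by unfold Spec_gerar_esquadrao_9_antiga_15; infer_instance

-- ===== CLAIM (what is proved, stated in full; the proofs are below) =====
def Claim_equal_gerar_esquadrao_9_antiga_15 : Prop := ∀ (hist_milhares : List (List String)), Dom_gerar_esquadrao_9_antiga_15 hist_milhares → Spec_gerar_esquadrao_9_antiga_15 hist_milhares (gerar_esquadrao_9_antiga_15 hist_milhares)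

-- ===== LEMMAS AND PROOFS =====

-- acc is a prefix of any Set.add fold extending it
theorem pv_prefix_foldl_add (ds : List String) (acc : List String) :
    acc <+: ds.foldl PySem.Set.add acc := by
  induction ds generalizing acc with
  | nil => exact List.prefix_refl _
  | cons d ds ih =>
    refine List.IsPrefix.trans ?_ (ih (PySem.Set.add acc d))
    simp [PySem.Set.add]
    split <;> simp

theorem pv_inner_eq (ds : List String) (acc : List String) (h : acc.length < 9) :
    pvInnerA acc ds = (ds.foldl PySem.Set.add acc).take 9 := by
  induction ds generalizing acc with
  | nil => simp [pvInnerA, List.take_of_length_le (Nat.le_of_lt h)]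
  | cons d ds ih =>
    by_cases hd : d ∈ acc
    · have ha : PySem.Set.add acc d = acc := by simp [PySem.Set.add, hd]
      rw [show pvInnerA acc (d::ds) = pvInnerA acc ds by rw [pvInnerA]; simp [hd],
        ih acc h, List.foldl_cons, ha]
    · have hadd : PySem.Set.add acc d = acc ++ [d] := by simp [PySem.Set.add, hd]
      by_cases h9 : (acc ++ [d]).length = 9
      · obtain ⟨t, ht⟩ := pv_prefix_foldl_add ds (acc ++ [d])
        rw [show pvInnerA acc (d::ds) = acc ++ [d] by rw [pvInnerA]; simp [hd, h9],
          List.foldl_cons, hadd, ← ht, ← h9, List.take_left]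
      · have hlt : (acc ++ [d]).length < 9 := by simp at h9 ⊢; omega
        have h8 : acc.length ≠ 8 := fun e => h9 (by simp [e])
        rw [show pvInnerA acc (d::ds) = pvInnerA (acc++[d]) ds by rw [pvInnerA]; simp [hd, h8],
          ih _ hlt, List.foldl_cons, hadd]

theorem pv_outer_eq (ms : List (List String)) (acc : List String) (h : acc.length < 9) :
    pvOuterA acc ms = (ms.foldl (fun a m => m.foldl PySem.Set.add a) acc).take 9 := by
  induction ms generalizing acc with
  | nil => simp [pvOuterA, List.take_of_length_le (Nat.le_of_lt h)]
  | cons m ms ih =>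
    rw [pvOuterA, pv_inner_eq m acc h]
    by_cases h9 : ((m.foldl PySem.Set.add acc).take 9).length = 9
    · rw [if_pos h9]
      have hpre : ∀ (ms' : List (List String)) (a : List String),
          a <+: ms'.foldl (fun a m => m.foldl PySem.Set.add a) a := by
        intro ms' a
        induction ms' generalizing a with
        | nil => exact List.prefix_refl _
        | cons m' ms'' ih2 =>
          exact List.IsPrefix.trans (pv_prefix_foldl_add m' a) (ih2 _)
      obtain ⟨t, ht⟩ := hpre ms (m.foldl PySem.Set.add acc)
      have hlen : 9 ≤ (m.foldl PySem.Set.add acc).length := by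
        have := h9; simp [List.length_take] at this; omega
      rw [List.foldl_cons, ← ht, List.take_append_of_le_length hlen]
    · have hlt : ((m.foldl PySem.Set.add acc).take 9).length < 9 := by
        have := List.length_take_le 9 (m.foldl PySem.Set.add acc)
        omega
      have heq : (m.foldl PySem.Set.add acc).take 9 = m.foldl PySem.Set.add acc := by
        apply List.take_of_length_le
        simp [List.length_take] at hlt ⊢
        omega
      rw [if_neg h9, heq, ih _ (by rw [heq] at hlt; exact hlt)]
      simp [List.foldl_cons]

theorem pv_foldl_flatMap_add (ms : List (List String)) (acc : List String) :
    ms.foldl (fun a m => m.foldl PySem.Set.add a) acc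
      = (ms.flatMap (fun m => m)).foldl PySem.Set.add acc := by
  induction ms generalizing acc with
  | nil => rfl
  | cons m ms ih => simp [List.flatMap_cons, List.foldl_append, ih]

theorem pv_digits_nodup : pvDigits.Nodup := by decide

-- find? is the head of the filtered list (no named library lemma states this form)
theorem pv_find?_eq_head?_filter (p : String → Bool) (l : List String) :
    l.find? p = (l.filter p).head? := by
  induction l with
  | nil => rfl
  | cons x xs ih =>
    by_cases hx : p x
    · rw [List.find?_cons_of_pos hx, List.filter_cons_of_pos hx]; rfl
    · rw [List.find?_cons_of_neg (by simpa using hx), List.filter_cons_of_neg (by simpa using hx), ih]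

-- closed form of A's top-up while-loop
theorem pv_topupA_eq (acc : List String) :
    pvTopupA acc = acc ++ (pvDigits.filter (fun d => decide (d ∉ acc))).take (9 - acc.length) := by
  rcases Nat.lt_or_ge acc.length 9 with hlt | hge
  · rw [pvTopupA, if_pos hlt]
    have hne : pvDigits.filter (fun d => decide (d ∉ acc)) ≠ [] := by
      intro hnil
      have hsub : pvDigits ⊆ acc := by
        intro x hx
        by_contra hxa
        have hmem : x ∈ pvDigits.filter (fun d => decide (d ∉ acc)) :=
          List.mem_filter.mpr ⟨hx, by simpa using hxa⟩
        rw [hnil] at hmem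
        exact absurd hmem (List.not_mem_nil)
      have h10 := (List.subperm_of_subset pv_digits_nodup hsub).length_le
      have : (10 : Nat) ≤ acc.length := by simpa [pvDigits] using h10
      omega
    obtain ⟨d, t, ht⟩ := List.exists_cons_of_ne_nil hne
    have hfind : pvDigits.find? (fun d => decide (d ∉ acc)) = some d := by
      rw [pv_find?_eq_head?_filter, ht]; rfl
    rw [hfind]
    have hred : (match some d with
        | some d => pvTopupA (acc ++ [d])
        | none => acc) = pvTopupA (acc ++ [d]) := rfl
    rw [hred]
    have hnd : (pvDigits.filter (fun d => decide (d ∉ acc))).Nodup :=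
      List.Nodup.filter _ pv_digits_nodup
    have hdt : d ∉ t := by rw [ht] at hnd; exact (List.nodup_cons.mp hnd).1
    have hf2 : pvDigits.filter (fun x => decide (x ∉ acc ++ [d])) = t := by
      have hsplit : pvDigits.filter (fun x => decide (x ∉ acc ++ [d]))
          = (pvDigits.filter (fun x => decide (x ∉ acc))).filter (fun x => decide (x ≠ d)) := by
        rw [List.filter_filter]
        apply List.filter_congr
        intro x _
        by_cases h1 : x ∈ acc <;> by_cases h2 : x = d <;> simp [h1, h2]
      rw [hsplit, ht, List.filter_cons]
      have hdd : (decide (d ≠ d)) = false := by simp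
      rw [hdd, if_neg (by simp)]
      apply List.filter_eq_self.mpr
      intro x hx
      have hxd : x ≠ d := fun e => hdt (e ▸ hx)
      simp [hxd]
    rw [pv_topupA_eq (acc ++ [d]), hf2, ht]
    have h1 : 9 - acc.length = (9 - (acc ++ [d]).length) + 1 := by simp; omega
    rw [h1, List.take_succ_cons]
    simp
  · rw [pvTopupA, if_neg (by omega)]
    have : 9 - acc.length = 0 := by omega
    simp [this]
termination_by 9 - acc.length
decreasing_by simp; omega

-- B's reverse-pass dict maps each member of xs to its FIRST index (last insert wins)
theorem pv_firstB_get? (xs : List String) (s : Int) (d : PySem.Dict String Int) (x : String) :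
    ((PySem.List.enumerate xs s).reverse.foldl (fun d p => d.insert p.2 p.1) d).get? x
      = if x ∈ xs then some (s + (xs.idxOf x : Int)) else d.get? x := by
  induction xs generalizing s d with
  | nil => simp [PySem.List.enumerate_nil]
  | cons y ys ih =>
    rw [PySem.List.enumerate_cons, List.reverse_cons, List.foldl_concat,
      PySem.Dict.get?_insert, ih]
    by_cases hxy : x = y
    · subst hxy
      simp
    · by_cases hmem : x ∈ ys
      · have h1 : x ∈ y :: ys := List.mem_cons_of_mem _ hmem
        have hidx : (y :: ys).idxOf x = ys.idxOf x + 1 := by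
          rw [List.idxOf_cons]
          simp [show (y == x) = false by simpa using fun e => hxy e.symm]
        simp only [if_pos hmem, if_pos h1, if_neg hxy, hidx]
        push_cast
        ring_nf
      · have h2 : x ∉ y :: ys := by simp [hxy, hmem]
        simp [hmem, h2, hxy]

theorem pv_firstB_getD (flat : List String) (x : String) (h : x ∈ flat) :
    (pvFirstB flat).getD x 0 = (flat.idxOf x : Int) := by
  rw [PySem.Dict.getD_eq_get?_getD, pvFirstB, pv_firstB_get?]
  simp [h]

theorem pv_firstB_keys (flat : List String) :
    (pvFirstB flat).keys = PySem.Set.ofList flat.reverse := by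
  have h := PySem.Dict.keys_foldl_insert_key ((PySem.List.enumerate flat 0).reverse)
    (fun p : Int × String => p.2) (fun _ p => p.1) (PySem.Dict.empty : PySem.Dict String Int)
  rw [pvFirstB, h, show (PySem.Dict.empty : PySem.Dict String Int).keys = [] from rfl,
    PySem.Set.update_nil_left, List.map_reverse, PySem.List.map_snd_enumerate]

-- the ordered dedup is strictly increasing in first-occurrence index
theorem pv_dedup_pairwise_idxOf (flat : List String) :
    (PySem.Set.ofList flat).Pairwise (fun a b => flat.idxOf a < flat.idxOf b) := by
  induction flat using List.reverseRecOn with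
  | nil => simp [PySem.Set.ofList]
  | append_singleton l x ih =>
    rw [PySem.Set.ofList_append_singleton]
    by_cases hx : x ∈ l
    · rw [PySem.Set.add_of_mem (by simpa [PySem.Set.mem_ofList] using hx)]
      refine List.Pairwise.imp_of_mem ?_ ih
      intro a b ha hb hab
      have ha' : a ∈ l := (PySem.Set.mem_ofList _ _).mp ha
      have hb' : b ∈ l := (PySem.Set.mem_ofList _ _).mp hb
      rw [List.idxOf_append_of_mem ha', List.idxOf_append_of_mem hb']
      exact hab
    · rw [PySem.Set.add_of_not_mem (by simpa [PySem.Set.mem_ofList] using hx)]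
      rw [List.pairwise_append]
      refine ⟨?_, List.pairwise_singleton _ _, ?_⟩
      · refine List.Pairwise.imp_of_mem ?_ ih
        intro a b ha hb hab
        rw [List.idxOf_append_of_mem ((PySem.Set.mem_ofList _ _).mp ha),
          List.idxOf_append_of_mem ((PySem.Set.mem_ofList _ _).mp hb)]
        exact hab
      · intro a ha b hb
        rw [List.mem_singleton] at hb
        subst hb
        have ha' : a ∈ l := (PySem.Set.mem_ofList _ _).mp ha
        rw [List.idxOf_append_of_mem ha', List.idxOf_append_of_notMem hx]
        have := List.idxOf_lt_length_of_mem ha'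
        simp
        omega

-- B's sort-by-first-occurrence of the dict's keys IS the ordered dedup
theorem pv_sorted_keys_eq_dedup (flat : List String) :
    PySem.List.sorted (pvFirstB flat).keys (fun k => (pvFirstB flat).getD k 0) false
      = PySem.List.dedup flat := by
  apply PySem.List.sorted_eq_of_perm_of_pairwise_lt
  · rw [pv_firstB_keys, PySem.List.dedup_eq_ofList]
    refine (List.perm_ext_iff_of_nodup (PySem.Set.nodup_ofList _) (PySem.Set.nodup_ofList _)).mpr ?_
    intro y
    simp [PySem.Set.mem_ofList]
  · rw [PySem.List.dedup_eq_ofList]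
    refine List.Pairwise.imp_of_mem ?_ (pv_dedup_pairwise_idxOf flat)
    intro a b ha hb hab
    have ha' : a ∈ flat := (PySem.Set.mem_ofList _ _).mp ha
    have hb' : b ∈ flat := (PySem.Set.mem_ofList _ _).mp hb
    rw [pv_firstB_getD flat a ha', pv_firstB_getD flat b hb']
    exact_mod_cast hab

-- ===== VERDICT (by name: the statement is the Claim_ definition above) =====
theorem gerar_esquadrao_9_antiga_15_spec : Claim_equal_gerar_esquadrao_9_antiga_15 := by
  intro hist _
  unfold Spec_gerar_esquadrao_9_antiga_15
  unfold gerar_esquadrao_9_antiga_15 gerar_esquadrao_9_antiga_15_alt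
  by_cases hnil : hist = []
  · simp [hnil]
  · simp only [if_neg hnil]
    have hjan : (if 15 ≤ hist.length then PySem.List.slice hist (some (-15)) none else hist)
        = PySem.List.slice hist (some (-15)) none := by
      split
      · rfl
      · rw [PySem.List.slice_from_neg_ofNat hist 15 (by omega)]
        rw [show hist.length - 15 = 0 by omega, List.drop_zero]
    rw [hjan]
    set jan := PySem.List.slice hist (some (-15)) none with hj
    have hcollect : pvOuterA [] jan = (PySem.List.dedup (jan.flatMap (fun m => m))).take 9 := by
      rw [pv_outer_eq jan [] (by simp), pv_foldl_flatMap_add,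
        PySem.List.dedup_eq_ofList, PySem.Set.ofList_eq_foldl]
    rw [hcollect, pv_topupA_eq, pv_sorted_keys_eq_dedup,
      show ((PySem.List.pyRange 0 10 1).map PySem.Int.toStr) = pvDigits from rfl]
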